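-- pv_equiv track=rewrite | github.com/bayuncao/lanalyzer | lanalyzer/analysis/chain_utils.py | find_callers
-- ===== SOURCE A (Python) =====
-- from typing import Any, Dict, List, Set, Optional
--
-- def find_callers(
--     func_name: str, reverse_call_graph: Dict[str, List[str]], max_depth: int
-- ) -> Set[str]:
--     """
--     Use BFS to find all functions that call the specified function.
--
--     Args:
--         func_name: Name of the function to find callers for
--         reverse_call_graph: Reverse call graph
--         max_depth: Maximum search depth
--
--     Returns:
--         Set of function names that call this function
--     """
--     callers = set()
--     visited = {func_name}
--     queue = [(func_name, 0)]
--
--     while queue: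
--         current, depth = queue.pop(0)
--
--         if depth >= max_depth:
--             continue
--
--         current_callers = reverse_call_graph.get(current, [])
--
--         for caller in current_callers:
--             callers.add(caller)
--
--             if caller not in visited:
--                 visited.add(caller)
--                 queue.append((caller, depth + 1))
--
--     return callers
-- ===== SOURCE B (Python) =====
-- def find_callers(func_name, reverse_call_graph, max_depth):
--     """Saturation instead of BFS: grow the reachable set to a fixpoint (capped at
--     max_depth-1 rounds), then return its out-neighborhood in one separate pass."""
--     if max_depth <= 0:
--         return set()
--     reach = {func_name}
--     for _ in range(max_depth - 1):
--         expanded = set(reach)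
--         for node in reach:
--             expanded.update(reverse_call_graph.get(node, []))
--         if len(expanded) == len(reach):
--             break
--         reach = expanded
--     result = set()
--     for node in reach:
--         result.update(reverse_call_graph.get(node, []))
--     return result
-- ===== Notes on version B (the rewrite author's own statement) =====
-- stated objective: alternative
-- what changed: Replaced queue-driven BFS with callers/visited bookkeeping by reachability-set saturation: the set reachable within max_depth-1 steps is grown by repeated whole-set expansion until a fixpoint (detected by the set's size) or the depth cap, and the answer is then computed as that set's out-neighborhood in one separate final pass; no queue, frontier, visited set or incrementally accumulated callers.
import Mathlib
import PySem

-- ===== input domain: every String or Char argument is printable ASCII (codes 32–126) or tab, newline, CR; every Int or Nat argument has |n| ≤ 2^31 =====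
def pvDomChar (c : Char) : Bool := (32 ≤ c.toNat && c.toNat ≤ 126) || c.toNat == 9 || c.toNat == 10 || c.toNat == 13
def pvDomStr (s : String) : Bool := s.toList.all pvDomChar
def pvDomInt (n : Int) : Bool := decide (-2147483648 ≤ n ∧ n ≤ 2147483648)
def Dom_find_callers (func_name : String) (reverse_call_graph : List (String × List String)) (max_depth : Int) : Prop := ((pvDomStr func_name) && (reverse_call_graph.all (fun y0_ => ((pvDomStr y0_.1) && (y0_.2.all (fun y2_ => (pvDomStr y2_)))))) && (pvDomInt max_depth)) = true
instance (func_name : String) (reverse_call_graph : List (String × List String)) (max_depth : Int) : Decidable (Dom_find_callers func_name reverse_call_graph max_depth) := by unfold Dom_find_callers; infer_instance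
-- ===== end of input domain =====

-- B replaces A's queue-driven BFS (visited set + incrementally accumulated callers) by
-- reachability-set saturation: grow the reachable set by whole-set expansion rounds until a
-- fixpoint (size check) or the depth cap, then compute the out-neighborhood in one final pass
-- (alternative algorithm of the same result; same set, queue/visited/frontier-free).

-- ===== PORT A =====
-- the inner 'for caller in current_callers' body of A
def fcStepA (d : Int) (st : PySem.Set String × PySem.Set String × List (String × Int)) (caller : String) :
    PySem.Set String × PySem.Set String × List (String × Int) :=
  let c := PySem.Set.add st.1 caller
  if caller ∈ st.2.1 then (c, st.2.1, st.2.2)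
  else (c, PySem.Set.add st.2.1 caller, st.2.2 ++ [(caller, d + 1)])

-- termination measure for A's while loop: unvisited graph entries (twice) plus queue length
def fcMeas (g : List (String × List String)) (v : PySem.Set String) (q : List (String × Int)) : Nat :=
  2 * ((g.flatMap Prod.snd).filter (fun x => decide (x ∉ v))).length + q.length

-- every element of reverse_call_graph.get(cur, []) occurs among the graph's values
lemma fc_getD_subset (g : List (String × List String)) (k x : String)
    (hx : x ∈ (PySem.Dict.mk g).getD k []) : x ∈ g.flatMap Prod.snd := by
  induction g with
  | nil => simp [PySem.Dict.getD_eq_get?_getD, PySem.Dict.get?] at hx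
  | cons p rest ih =>
    rcases p with ⟨k', vs⟩
    rw [PySem.Dict.getD_eq_get?_getD, PySem.Dict.get?_mk_cons] at hx
    by_cases h : (k' == k) = true
    · simp [h] at hx
      exact List.mem_flatMap.mpr ⟨(k', vs), by simp, hx⟩
    · simp [h, ← PySem.Dict.getD_eq_get?_getD] at hx
      rcases List.mem_flatMap.mp (ih hx) with ⟨p, hp, hxp⟩
      exact List.mem_flatMap.mpr ⟨p, List.mem_cons_of_mem _ hp, hxp⟩

-- adding an unvisited graph entry strictly shrinks the unvisited set
lemma fc_filter_lt (pool : List String) (v : PySem.Set String) (a : String)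
    (hp : a ∈ pool) (hv : a ∉ v) :
    (pool.filter (fun x => decide (x ∉ PySem.Set.add v a))).length
      < (pool.filter (fun x => decide (x ∉ v))).length := by
  have hsub : (pool.filter (fun x => decide (x ∉ PySem.Set.add v a))).Sublist
      (pool.filter (fun x => decide (x ∉ v))) := by
    refine List.monotone_filter_right pool (fun x hx => ?_)
    simp only [decide_eq_true_eq] at hx ⊢
    intro hxv
    exact hx ((PySem.Set.mem_add v a x).mpr (Or.inl hxv))
  refine lt_of_le_of_ne hsub.length_le (fun heq => ?_)
  have := hsub.eq_of_length heq
  have ha1 : a ∈ pool.filter (fun x => decide (x ∉ v)) := by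
    simp [List.mem_filter, hp, hv]
  rw [← this] at ha1
  simp [List.mem_filter] at ha1

-- the inner fold never increases the measure (each appended tuple newly visits a graph entry)
lemma fc_foldA_meas (g : List (String × List String)) (d : Int) :
    ∀ (cs : List String), (∀ x ∈ cs, x ∈ g.flatMap Prod.snd) →
    ∀ (c v : PySem.Set String) (q : List (String × Int)),
      fcMeas g ((cs.foldl (fcStepA d) (c, v, q)).2.1) ((cs.foldl (fcStepA d) (c, v, q)).2.2)
        ≤ fcMeas g v q := by
  intro cs
  induction cs with
  | nil => intro _ c v q; simp
  | cons a cs ih =>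
    intro hcs c v q
    have ha : a ∈ g.flatMap Prod.snd := hcs a (by simp)
    have hcs' : ∀ x ∈ cs, x ∈ g.flatMap Prod.snd := fun x hx => hcs x (by simp [hx])
    simp only [List.foldl_cons]
    by_cases hv : a ∈ v
    · simp only [fcStepA, if_pos hv]
      exact ih hcs' _ v q
    · simp only [fcStepA, if_neg hv]
      refine le_trans (ih hcs' _ _ _) ?_
      have := fc_filter_lt (g.flatMap Prod.snd) v a ha hv
      simp only [fcMeas, List.length_append, List.length_cons, List.length_nil]
      omega

-- A's while loop, verbatim: pop front, skip if depth >= max_depth, else fold the callers list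
def fcLoopA (g : List (String × List String)) (md : Int) (c v : PySem.Set String)
    (q : List (String × Int)) : PySem.Set String :=
  match q with
  | [] => c
  | (cur, d) :: rest =>
    if d ≥ md then fcLoopA g md c v rest
    else
      fcLoopA g md ((((PySem.Dict.mk g).getD cur []).foldl (fcStepA d) (c, v, rest)).1)
        ((((PySem.Dict.mk g).getD cur []).foldl (fcStepA d) (c, v, rest)).2.1)
        ((((PySem.Dict.mk g).getD cur []).foldl (fcStepA d) (c, v, rest)).2.2)
  termination_by fcMeas g v q
  decreasing_by
  · simp [fcMeas]
  · refine lt_of_le_of_lt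
      (fc_foldA_meas g d ((PySem.Dict.mk g).getD cur []) (fun x hx => fc_getD_subset g cur x hx) c v rest) ?_
    simp [fcMeas]

def find_callers (func_name : String) (reverse_call_graph : List (String × List String)) (max_depth : Int) : List String :=
  fcLoopA reverse_call_graph max_depth PySem.Set.empty (PySem.Set.ofList [func_name]) [(func_name, 0)]

-- ===== PORT B =====
-- one saturation round: 'expanded = set(reach); for node in reach: expanded.update(get(node, []))'
def fcExpand (g : List (String × List String)) (reach : PySem.Set String) : PySem.Set String :=
  reach.foldl (fun expanded node => PySem.Set.update expanded ((PySem.Dict.mk g).getD node [])) reach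

-- B's 'for _ in range(max_depth - 1)' loop with the 'len(expanded) == len(reach)' break
def fcSat (g : List (String × List String)) : Nat → PySem.Set String → PySem.Set String
  | 0, reach => reach
  | k + 1, reach =>
    let expanded := fcExpand g reach
    if expanded.length = reach.length then reach else fcSat g k expanded

def find_callers_alt (func_name : String) (reverse_call_graph : List (String × List String)) (max_depth : Int) : List String :=
  if max_depth ≤ 0 then PySem.Set.empty
  else
    (fcSat reverse_call_graph (max_depth - 1).toNat (PySem.Set.ofList [func_name])).foldl
      (fun result node => PySem.Set.update result ((PySem.Dict.mk reverse_call_graph).getD node [])) PySem.Set.empty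

-- ===== PRECONDITION & SPEC =====
def Spec_find_callers (func_name : String) (reverse_call_graph : List (String × List String)) (max_depth : Int) (out : List String) : Prop := out = find_callers_alt func_name reverse_call_graph max_depth
instance (func_name : String) (reverse_call_graph : List (String × List String)) (max_depth : Int) (out : List String) : Decidable (Spec_find_callers func_name reverse_call_graph max_depth out) := by unfold Spec_find_callers; infer_instance

-- ===== CLAIM (what is proved, stated in full; the proofs are below) =====
def Claim_equal_find_callers : Prop := ∀ (func_name : String) (reverse_call_graph : List (String × List String)) (max_depth : Int), Dom_find_callers func_name reverse_call_graph max_depth → Spec_find_callers func_name reverse_call_graph max_depth (find_callers func_name reverse_call_graph max_depth)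


-- ===== LEMMAS AND PROOFS =====
-- abbreviation used only in the proofs: one adjacency lookup
def fcAdj (g : List (String × List String)) (x : String) : List String :=
  (PySem.Dict.mk g).getD x []

-- proof-side intermediate formulation: frontier BFS carrying (callers, visited, next-frontier)
def fcStepB (st : PySem.Set String × PySem.Set String × PySem.Set String) (caller : String) :
    PySem.Set String × PySem.Set String × PySem.Set String :=
  let c := PySem.Set.add st.1 caller
  if caller ∈ st.2.1 then (c, st.2.1, st.2.2)
  else (c, PySem.Set.add st.2.1 caller, PySem.Set.add st.2.2 caller)

def fcFront (g : List (String × List String)) : Nat → PySem.Set String → PySem.Set String →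
    PySem.Set String → PySem.Set String
  | 0, c, _, _ => c
  | k + 1, c, v, f =>
    if f.isEmpty then c
    else
      fcFront g k ((f.foldl (fun st cur => (fcAdj g cur).foldl fcStepB st) (c, v, PySem.Set.empty)).1)
        ((f.foldl (fun st cur => (fcAdj g cur).foldl fcStepB st) (c, v, PySem.Set.empty)).2.1)
        ((f.foldl (fun st cur => (fcAdj g cur).foldl fcStepB st) (c, v, PySem.Set.empty)).2.2)

-- neighborhood accumulation: fold Set.update of adjacency lists over a node list
def fcNb (g : List (String × List String)) (s : PySem.Set String) (F : List String) : PySem.Set String :=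
  F.foldl (fun acc node => PySem.Set.update acc (fcAdj g node)) s

-- ========== stage 1: A's queue loop equals the frontier formulation ==========

-- inner correspondence: A's fold over the callers list, run on a queue 'q0 ++ next-level tuples',
-- is the frontier fold with the appended tuples tracked as the next frontier
lemma fc_inner (d : Int) :
    ∀ (cs : List String) (c v N : PySem.Set String) (q0 : List (String × Int)),
      (∀ x ∈ N, x ∈ v) →
      (cs.foldl (fcStepA d) (c, v, q0 ++ N.map (fun x => (x, d + 1))) =
        ((cs.foldl fcStepB (c, v, N)).1, (cs.foldl fcStepB (c, v, N)).2.1,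
          q0 ++ (cs.foldl fcStepB (c, v, N)).2.2.map (fun x => (x, d + 1))))
      ∧ (∀ x ∈ (cs.foldl fcStepB (c, v, N)).2.2, x ∈ (cs.foldl fcStepB (c, v, N)).2.1) := by
  intro cs
  induction cs with
  | nil => intro c v N q0 hN; exact ⟨rfl, hN⟩
  | cons a cs ih =>
    intro c v N q0 hN
    simp only [List.foldl_cons]
    by_cases hv : a ∈ v
    · simp only [fcStepA, fcStepB, if_pos hv]
      exact ih _ v N q0 hN
    · have haN : a ∉ N := fun h => hv (hN a h)
      simp only [fcStepA, fcStepB, if_neg hv]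
      have hadd : PySem.Set.add N a = N ++ [a] := PySem.Set.add_of_not_mem haN
      have hq : (q0 ++ N.map (fun x => (x, d + 1))) ++ [(a, d + 1)]
          = q0 ++ (PySem.Set.add N a).map (fun x => (x, d + 1)) := by
        rw [hadd]; simp
      have hN' : ∀ x ∈ PySem.Set.add N a, x ∈ PySem.Set.add v a := by
        intro x hx
        rcases (PySem.Set.mem_add N a x).mp hx with h | h
        · exact (PySem.Set.mem_add v a x).mpr (Or.inl (hN x h))
        · exact (PySem.Set.mem_add v a x).mpr (Or.inr h)
      rw [hq]
      exact ih _ _ _ q0 hN'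

-- a queue holding only tuples at depth ≥ max_depth is drained without effect
lemma fc_skip (g : List (String × List String)) (md : Int) :
    ∀ (F : List String) (c v : PySem.Set String) (d : Int), md ≤ d →
      fcLoopA g md c v (F.map (fun x => (x, d))) = c := by
  intro F
  induction F with
  | nil => intro c v d _; rw [fcLoopA.eq_def]; simp
  | cons a F ih =>
    intro c v d hd
    rw [List.map_cons, fcLoopA.eq_def]
    simp only [ge_iff_le, if_pos hd]
    exact ih c v d hd

-- one BFS level: A consumes the depth-d tuples, accumulating exactly the next frontier
lemma fc_level (g : List (String × List String)) (md d : Int) (hd : d < md) :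
    ∀ (F : List String) (c v N : PySem.Set String), (∀ x ∈ N, x ∈ v) →
      (fcLoopA g md c v (F.map (fun x => (x, d)) ++ N.map (fun x => (x, d + 1))) =
        fcLoopA g md ((F.foldl (fun st cur => (fcAdj g cur).foldl fcStepB st) (c, v, N)).1)
          ((F.foldl (fun st cur => (fcAdj g cur).foldl fcStepB st) (c, v, N)).2.1)
          (((F.foldl (fun st cur => (fcAdj g cur).foldl fcStepB st) (c, v, N)).2.2).map (fun x => (x, d + 1))))
      ∧ (∀ x ∈ (F.foldl (fun st cur => (fcAdj g cur).foldl fcStepB st) (c, v, N)).2.2,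
          x ∈ (F.foldl (fun st cur => (fcAdj g cur).foldl fcStepB st) (c, v, N)).2.1) := by
  intro F
  induction F with
  | nil => intro c v N hN; exact ⟨rfl, hN⟩
  | cons cur F ih =>
    intro c v N hN
    obtain ⟨heq, hinv⟩ := fc_inner d (fcAdj g cur) c v N
      (F.map (fun x => (x, d))) hN
    simp only [List.map_cons, List.cons_append, List.foldl_cons]
    rw [fcLoopA.eq_def]
    simp only [ge_iff_le, if_neg (not_le.mpr hd), fcAdj] at heq ⊢
    rw [heq]
    exact ih _ _ _ hinv

-- main induction over the remaining number of rounds k = max_depth - d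
lemma fc_main (g : List (String × List String)) (md : Int) :
    ∀ (k : Nat) (d : Int), d + (k : Int) = md →
      ∀ (c v : PySem.Set String) (F : List String),
        fcLoopA g md c v (F.map (fun x => (x, d))) = fcFront g k c v F := by
  intro k
  induction k with
  | zero =>
    intro d hd c v F
    rw [fcFront]
    exact fc_skip g md F c v d (by omega)
  | succ k ih =>
    intro d hd c v F
    have hdlt : d < md := by omega
    cases F with
    | nil =>
      rw [fcLoopA.eq_def, fcFront]
      simp
    | cons cur F' =>
      obtain ⟨heq, hinv⟩ := fc_level g md d hdlt (cur :: F') c v PySem.Set.empty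
        (fun x hx => absurd hx (by simp [PySem.Set.empty]))
      rw [fcFront]
      simp only [List.isEmpty_cons, Bool.false_eq_true, if_false]
      simp only [PySem.Set.empty, List.map_nil, List.append_nil] at heq
      rw [heq]
      exact ih (d + 1) (by omega) _ _ _

-- ========== stage 2: the frontier formulation equals B's saturation ==========

-- decomposing the frontier fold: callers and visited are plain Set.update folds,
-- and visited stays 'original visited ++ new frontier'
lemma fc_inner2 (cs : List String) :
    ∀ (c v0 N : PySem.Set String),
      (cs.foldl fcStepB (c, v0 ++ N, N)).1 = PySem.Set.update c cs
      ∧ (cs.foldl fcStepB (c, v0 ++ N, N)).2.1 = PySem.Set.update (v0 ++ N) cs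
      ∧ (cs.foldl fcStepB (c, v0 ++ N, N)).2.1 = v0 ++ (cs.foldl fcStepB (c, v0 ++ N, N)).2.2 := by
  induction cs with
  | nil =>
    intro c v0 N
    simp [PySem.Set.update]
  | cons a cs ih =>
    intro c v0 N
    simp only [List.foldl_cons, PySem.Set.update_cons]
    by_cases hv : a ∈ v0 ++ N
    · simp only [fcStepB, if_pos hv, PySem.Set.add_of_mem hv]
      exact ih (PySem.Set.add c a) v0 N
    · have haN : a ∉ N := fun h => hv (List.mem_append_right v0 h)
      simp only [fcStepB, if_neg hv, PySem.Set.add_of_not_mem hv, PySem.Set.add_of_not_mem haN,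
        List.append_assoc]
      exact ih (PySem.Set.add c a) v0 (N ++ [a])

-- neighborhood folds compose over list append
lemma fcNb_append (g : List (String × List String)) (s : PySem.Set String) (P F : List String) :
    fcNb g s (P ++ F) = fcNb g (fcNb g s P) F := by
  simp [fcNb, List.foldl_append]

-- one frontier level as Set.update folds
lemma fc_level2 (g : List (String × List String)) (F : List String) :
    ∀ (c v0 N : PySem.Set String),
      (F.foldl (fun st cur => (fcAdj g cur).foldl fcStepB st) (c, v0 ++ N, N)).1 = fcNb g c F
      ∧ (F.foldl (fun st cur => (fcAdj g cur).foldl fcStepB st) (c, v0 ++ N, N)).2.1 = fcNb g (v0 ++ N) F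
      ∧ (F.foldl (fun st cur => (fcAdj g cur).foldl fcStepB st) (c, v0 ++ N, N)).2.1
          = v0 ++ (F.foldl (fun st cur => (fcAdj g cur).foldl fcStepB st) (c, v0 ++ N, N)).2.2 := by
  induction F with
  | nil => intro c v0 N; exact ⟨rfl, rfl, rfl⟩
  | cons x F ih =>
    intro c v0 N
    obtain ⟨h1, h2, h3⟩ := fc_inner2 (fcAdj g x) c v0 N
    have hstate : (fcAdj g x).foldl fcStepB (c, v0 ++ N, N)
        = (PySem.Set.update c (fcAdj g x),
           v0 ++ ((fcAdj g x).foldl fcStepB (c, v0 ++ N, N)).2.2,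
           ((fcAdj g x).foldl fcStepB (c, v0 ++ N, N)).2.2) := by
      refine Prod.ext h1 (Prod.ext ?_ rfl)
      exact h3
    obtain ⟨g1, g2, g3⟩ :=
      ih (PySem.Set.update c (fcAdj g x)) v0 (((fcAdj g x).foldl fcStepB (c, v0 ++ N, N)).2.2)
    have hmid : fcNb g (v0 ++ ((fcAdj g x).foldl fcStepB (c, v0 ++ N, N)).2.2) F
        = fcNb g (PySem.Set.update (v0 ++ N) (fcAdj g x)) F := by
      rw [h3.symm.trans h2]
    refine ⟨?_, ?_, ?_⟩
    · show ((x :: F).foldl (fun st cur => (fcAdj g cur).foldl fcStepB st) (c, v0 ++ N, N)).1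
        = fcNb g c (x :: F)
      rw [List.foldl_cons, hstate]
      exact g1
    · show _ = fcNb g (v0 ++ N) (x :: F)
      rw [List.foldl_cons, hstate,
        show fcNb g (v0 ++ N) (x :: F) = fcNb g (PySem.Set.update (v0 ++ N) (fcAdj g x)) F from rfl,
        ← hmid]
      exact g2
    · rw [List.foldl_cons, hstate]
      exact g3

-- one frontier round, packaged: the new frontier N is exactly what the neighborhood fold appends
lemma fc_round (g : List (String × List String)) (F : List String) (c v : PySem.Set String) :
    ∃ N : PySem.Set String,
      (F.foldl (fun st cur => (fcAdj g cur).foldl fcStepB st) (c, v, PySem.Set.empty))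
          = (fcNb g c F, v ++ N, N)
      ∧ fcNb g v F = v ++ N := by
  have h := fc_level2 g F c v []
  simp only [List.append_nil] at h
  obtain ⟨h1, h2, h3⟩ := h
  exact ⟨_, Prod.ext h1 (Prod.ext h3 rfl), h2.symm.trans h3⟩

-- updating with elements already present is a no-op
lemma fc_update_subset (xs : List String) :
    ∀ (s : PySem.Set String), (∀ y ∈ xs, y ∈ s) → PySem.Set.update s xs = s := by
  induction xs with
  | nil => intro s _; simp [PySem.Set.update]
  | cons a xs ih =>
    intro s hs
    rw [PySem.Set.update_cons, PySem.Set.add_of_mem (hs a (by simp))]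
    exact ih s (fun y hy => hs y (by simp [hy]))

-- folding adjacency updates of already-closed nodes is a no-op
lemma fc_nb_closed (g : List (String × List String)) (P : List String) :
    ∀ (v : PySem.Set String), (∀ x ∈ P, ∀ y ∈ fcAdj g x, y ∈ v) → fcNb g v P = v := by
  induction P with
  | nil => intro v _; rfl
  | cons x P ih =>
    intro v hv
    simp only [fcNb, List.foldl_cons]
    rw [show PySem.Set.update v (fcAdj g x) = v from fc_update_subset (fcAdj g x) v (hv x (by simp))]
    exact ih v (fun x hx => hv x (by simp [hx]))

-- membership in a neighborhood fold
lemma fc_mem_nb (g : List (String × List String)) (F : List String) :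
    ∀ (s : PySem.Set String) (y : String),
      y ∈ fcNb g s F ↔ y ∈ s ∨ ∃ x ∈ F, y ∈ fcAdj g x := by
  induction F with
  | nil => intro s y; simp [fcNb]
  | cons x F ih =>
    intro s y
    simp only [fcNb, List.foldl_cons]
    rw [show (F.foldl (fun acc node => PySem.Set.update acc (fcAdj g node))
        (PySem.Set.update s (fcAdj g x))) = fcNb g (PySem.Set.update s (fcAdj g x)) F from rfl,
      ih]
    simp only [PySem.Set.mem_update, List.mem_cons]
    constructor
    · rintro ((h | h) | ⟨z, hz, hy⟩)
      · exact Or.inl h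
      · exact Or.inr ⟨x, Or.inl rfl, h⟩
      · exact Or.inr ⟨z, Or.inr hz, hy⟩
    · rintro (h | ⟨z, (rfl | hz), hy⟩)
      · exact Or.inl (Or.inl h)
      · exact Or.inl (Or.inr hy)
      · exact Or.inr ⟨z, hz, hy⟩

-- one saturation round on a closed prefix expands exactly by the frontier's neighborhood
lemma fc_expand_eq (g : List (String × List String)) (P F : List String)
    (hP : ∀ x ∈ P, ∀ y ∈ fcAdj g x, y ∈ P ++ F) :
    fcExpand g (P ++ F) = fcNb g (P ++ F) F := by
  show (P ++ F).foldl (fun e node => PySem.Set.update e ((PySem.Dict.mk g).getD node [])) (P ++ F)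
      = fcNb g (P ++ F) F
  rw [List.foldl_append]
  have hp : P.foldl (fun e node => PySem.Set.update e ((PySem.Dict.mk g).getD node [])) (P ++ F)
      = P ++ F := fc_nb_closed g P (P ++ F) hP
  rw [hp]
  rfl

-- fcSat unfolding, fixpoint case
lemma fcSat_stable (g : List (String × List String)) (v : PySem.Set String) (k : Nat)
    (h : fcExpand g v = v) : fcSat g (k + 1) v = v := by
  rw [fcSat]
  simp [h]

-- fcSat unfolding, growth case
lemma fcSat_step (g : List (String × List String)) (v : PySem.Set String) (k : Nat)
    (h : ¬ (fcExpand g v).length = v.length) : fcSat g (k + 1) v = fcSat g k (fcExpand g v) := by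
  rw [fcSat]
  simp [h]

-- an empty frontier returns the accumulated callers immediately
lemma fcFront_empty (g : List (String × List String)) (k : Nat) (c v : PySem.Set String) :
    fcFront g (k + 1) c v [] = c := by
  rw [fcFront]
  simp

-- bridge: the frontier loop computes the neighborhood of the saturated reachable set
lemma fc_bridge (g : List (String × List String)) :
    ∀ (k : Nat) (P F c v : PySem.Set String),
      v = P ++ F → c = fcNb g PySem.Set.empty P → (∀ x ∈ P, ∀ y ∈ fcAdj g x, y ∈ v) →
      fcFront g (k + 1) c v F = fcNb g PySem.Set.empty (fcSat g k v) := by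
  intro k
  induction k with
  | zero =>
    intro P F c v hv hc _
    rw [fcSat]
    cases F with
    | nil =>
      rw [fcFront_empty, hc, hv, List.append_nil]
    | cons x F' =>
      obtain ⟨N, hE, _⟩ := fc_round g (x :: F') c v
      rw [fcFront]
      simp only [List.isEmpty_cons, Bool.false_eq_true, if_false]
      rw [hE, fcFront, hc, hv, ← fcNb_append]
  | succ k ih =>
    intro P F c v hv hc hcl
    have hclv : ∀ x ∈ P, ∀ y ∈ fcAdj g x, y ∈ P ++ F := by rw [← hv]; exact hcl
    have hexp : fcExpand g v = fcNb g v F := by rw [hv]; exact fc_expand_eq g P F hclv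
    cases F with
    | nil =>
      have hveq : fcExpand g v = v := by rw [hexp]; rfl
      rw [fcFront_empty, fcSat_stable g v k hveq, hc, hv, List.append_nil]
    | cons x F' =>
      obtain ⟨N, hE, hN⟩ := fc_round g (x :: F') c v
      have hexp2 : fcExpand g v = v ++ N := hexp.trans hN
      rw [fcFront]
      simp only [List.isEmpty_cons, Bool.false_eq_true, if_false]
      rw [hE]
      have hc' : fcNb g c (x :: F') = fcNb g PySem.Set.empty v := by
        rw [hc, hv, ← fcNb_append]
      cases N with
      | nil =>
        have hveq : fcExpand g v = v := by rw [hexp2, List.append_nil]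
        rw [fcSat_stable g v k hveq, List.append_nil, fcFront_empty, hc']
      | cons z N' =>
        have hlen : ¬ (fcExpand g v).length = v.length := by
          rw [hexp2]
          simp only [List.length_append, List.length_cons]
          omega
        rw [fcSat_step g v k hlen, hexp2]
        refine ih v (z :: N') (fcNb g c (x :: F')) (v ++ (z :: N')) rfl hc' ?_
        intro a ha y hy
        rw [← hN, fc_mem_nb]
        rw [hv] at ha
        rcases List.mem_append.mp ha with haP | haF
        · exact Or.inl (hcl a haP y hy)
        · exact Or.inr ⟨a, haF, hy⟩

-- ===== VERDICT (by name: the statement is the Claim_ definition above) =====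
theorem find_callers_spec : Claim_equal_find_callers := by
  intro func_name g md _
  unfold Spec_find_callers find_callers find_callers_alt
  by_cases hmd : md ≤ 0
  · simp only [if_pos hmd]
    exact fc_skip g md [func_name] PySem.Set.empty (PySem.Set.ofList [func_name]) 0 hmd
  · simp only [if_neg hmd]
    have hk : md.toNat = (md - 1).toNat + 1 := by omega
    have h0 : (0 : Int) + (md.toNat : Int) = md := by omega
    have hmain := fc_main g md md.toNat 0 h0 PySem.Set.empty (PySem.Set.ofList [func_name]) [func_name]
    simp only [List.map_cons, List.map_nil] at hmain
    rw [hmain, hk,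
      fc_bridge g (md - 1).toNat [] [func_name] PySem.Set.empty (PySem.Set.ofList [func_name])
        rfl rfl (by intro x hx; simp at hx)]
    rfl
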